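-- pv_equiv track=rewrite | github.com/Rishabhsingh11/Ascend | src/enhanced_resume_parser.py | parse_projects_section
-- ===== SOURCE A (Python) =====
-- from typing import List, Dict, Optional
--
-- def parse_projects_section(lines: List[str]) -> List[str]:
--     projects = []
--     current_project = []
--
--     for line in lines:
--         line = line.strip()
--         if '|' in line and not line.startswith('•'):
--             if current_project:
--                 projects.append(' '.join(current_project))
--             current_project = [line]
--         else:
--             current_project.append(line)
--
--     if current_project:
--         projects.append(' '.join(current_project))
--
--     return projects
-- ===== SOURCE B (Python) =====
-- from typing import List
--
--
-- def parse_projects_section(lines: List[str]) -> List[str]: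
--     # Two-pass: compute segment boundaries (header indices), then slice and join.
--     stripped = [l.strip() for l in lines]
--     cuts = [0] + [i for i, s in enumerate(stripped)
--                   if i > 0 and '|' in s and not s.startswith('•')] + [len(stripped)]
--     out = []
--     for a, b in zip(cuts, cuts[1:]):
--         seg = stripped[a:b]
--         if seg:
--             out.append(' '.join(seg))
--     return out
-- ===== Notes on version B (the rewrite author's own statement) =====
-- stated objective: alternative
-- what changed: B replaces A's single-pass accumulator with conditional flush by a staged pipeline: strip all lines, collect header indices in one scan, form cut positions [0]+headers+[len], then slice the stripped list between consecutive cuts and join each non-empty slice.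
import Mathlib
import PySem

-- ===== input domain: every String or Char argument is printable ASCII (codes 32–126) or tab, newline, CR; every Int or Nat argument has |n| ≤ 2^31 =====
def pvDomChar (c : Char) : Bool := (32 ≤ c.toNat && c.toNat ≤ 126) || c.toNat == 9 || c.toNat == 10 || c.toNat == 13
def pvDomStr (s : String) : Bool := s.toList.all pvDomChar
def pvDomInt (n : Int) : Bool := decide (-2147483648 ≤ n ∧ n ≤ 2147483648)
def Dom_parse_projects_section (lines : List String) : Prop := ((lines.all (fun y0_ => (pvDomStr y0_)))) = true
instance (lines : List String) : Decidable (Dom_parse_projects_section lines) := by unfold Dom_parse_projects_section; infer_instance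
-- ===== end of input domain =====

-- B computes the header cut positions first and then slices the stripped lines between
-- consecutive cuts, instead of A's one-pass accumulator with conditional flush;
-- objective: alternative decomposition, same cost.

-- "'|' in s and not s.startswith('•')" — the header test both Pythons contain textually
def pvHdr (s : String) : Bool := PySem.Str.isIn "|" s && !(PySem.Str.startswith s "•")

-- ===== PORT A =====
def pvStepA (st : List String × List String) (line0 : String) : List String × List String :=
  let line := PySem.Str.strip line0
  if pvHdr line then
    ((if st.2.isEmpty then st.1 else st.1 ++ [PySem.Str.join " " st.2]), [line])
  else
    (st.1, st.2 ++ [line])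

def parse_projects_section (lines : List String) : List String :=
  let st := lines.foldl pvStepA ([], [])
  if st.2.isEmpty then st.1 else st.1 ++ [PySem.Str.join " " st.2]

-- ===== PORT B =====
def parse_projects_section_alt (lines : List String) : List String :=
  let stripped := lines.map PySem.Str.strip
  let cuts : List Int :=
    [0] ++ ((PySem.List.enumerate stripped 0).filter
              (fun p => decide (0 < p.1) && pvHdr p.2)).map (·.1)
        ++ [(stripped.length : Int)]
  (cuts.zip cuts.tail).foldl
    (fun out ab =>
      let seg := PySem.List.slice stripped (some ab.1) (some ab.2)
      if seg.isEmpty then out else out ++ [PySem.Str.join " " seg]) []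

-- ===== PRECONDITION & SPEC =====
def Spec_parse_projects_section (lines : List String) (out : List String) : Prop := out = parse_projects_section_alt lines
instance (lines : List String) (out : List String) : Decidable (Spec_parse_projects_section lines out) := by unfold Spec_parse_projects_section; infer_instance

-- ===== CLAIM (what is proved, stated in full; the proofs are below) =====
def Claim_equal_parse_projects_section : Prop := ∀ (lines : List String), Dom_parse_projects_section lines → Spec_parse_projects_section lines (parse_projects_section lines)

-- ===== LEMMAS AND PROOFS =====

-- front-recursion segmentation: (segments starting at headers, prefix before the first header)
def pvG : List String → List (List String) × List String
  | [] => ([], [])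
  | s :: xs =>
    let r := pvG xs
    if pvHdr s then ((s :: r.2) :: r.1, []) else (r.1, s :: r.2)

def pvFinA (st : List String × List String) : List String :=
  if st.2.isEmpty then st.1 else st.1 ++ [PySem.Str.join " " st.2]

-- A's fold appends the joined segments of the stripped lines after the pending segment
theorem pvLemA : ∀ (xs : List String) (p c : List String),
    pvFinA (xs.foldl pvStepA (p, c))
    = p ++ (if (c ++ (pvG (xs.map PySem.Str.strip)).2).isEmpty
             then (pvG (xs.map PySem.Str.strip)).1
             else (c ++ (pvG (xs.map PySem.Str.strip)).2) :: (pvG (xs.map PySem.Str.strip)).1).map (PySem.Str.join " ") := by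
  intro xs
  induction xs with
  | nil =>
    intro p c
    simp only [List.foldl_nil, List.map_nil, pvG, pvFinA]
    by_cases h : c.isEmpty <;> simp [h]
  | cons x xs ih =>
    intro p c
    rw [List.foldl_cons]
    simp only [List.map_cons, pvG, pvStepA]
    by_cases h : pvHdr (PySem.Str.strip x)
    · by_cases hc : c.isEmpty
      · have hc' : c = [] := by simpa [List.isEmpty_iff] using hc
        simp [h, hc', ih]
      · have hc' : c ≠ [] := by simpa [List.isEmpty_iff] using hc
        simp [h, hc, ih]
    · simp [h, ih, List.append_assoc]

-- header indices of a list (0-based)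
def pvIdx : List String → List Nat
  | [] => []
  | s :: xs => if pvHdr s then 0 :: (pvIdx xs).map (· + 1) else (pvIdx xs).map (· + 1)

-- chop xs at consecutive cut positions, joining non-empty slices
def pvChop (xs : List String) : List Nat → List String
  | a :: b :: rest =>
      (let seg := (xs.drop a).take (b - a)
       if seg.isEmpty then [] else [PySem.Str.join " " seg]) ++ pvChop xs (b :: rest)
  | _ => []

-- B's zip-fold over Int cuts is pvChop on the underlying Nat cuts
theorem pvFoldChop : ∀ (cs : List Nat) (xs : List String) (acc : List String),
    (((cs.map (Nat.cast : Nat → Int)).zip (cs.map (Nat.cast : Nat → Int)).tail).foldl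
      (fun out ab =>
        let seg := PySem.List.slice xs (some ab.1) (some ab.2)
        if seg.isEmpty then out else out ++ [PySem.Str.join " " seg]) acc)
    = acc ++ pvChop xs cs := by
  intro cs
  induction cs with
  | nil => intro xs acc; simp [pvChop]
  | cons a cs ih =>
    cases cs with
    | nil => intro xs acc; simp [pvChop]
    | cons b rest =>
      intro xs acc
      have hslice : PySem.List.slice xs (some ((a : Int))) (some ((b : Int)))
          = (xs.drop a).take (b - a) := by
        rw [PySem.List.slice_toNat _ (by positivity) (by positivity)]
        simp
      simp only [List.map_cons, List.tail_cons, List.zip_cons_cons, List.foldl_cons]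
      have hz : (List.zip (((b : Nat) : Int) :: List.map (Nat.cast : Nat → Int) rest) (List.map (Nat.cast : Nat → Int) rest) : List (Int × Int))
            = ((List.map (Nat.cast : Nat → Int) (b :: rest)).zip (List.map (Nat.cast : Nat → Int) (b :: rest)).tail) := by simp
      rw [hz, ih]
      simp only [pvChop, hslice]
      split_ifs with h <;> simp

-- shifting every cut by one skips the head element
theorem pvChopShift : ∀ (cs : List Nat) (x : String) (xs : List String),
    pvChop (x :: xs) (cs.map (· + 1)) = pvChop xs cs := by
  intro cs
  induction cs with
  | nil => intro x xs; simp [pvChop]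
  | cons a cs ih =>
    cases cs with
    | nil => intro x xs; simp [pvChop]
    | cons b rest =>
      intro x xs
      have hm : (((b + 1) :: List.map (· + 1) rest) : List Nat) = List.map (· + 1) (b :: rest) := by simp
      simp only [List.map_cons, pvChop]
      rw [hm, ih]
      have h2 : b + 1 - (a + 1) = b - a := by omega
      rw [h2, List.drop_succ_cons]

-- the prefix before the first header is a take at the first cut of the tail cuts
theorem pvTakePref : ∀ (r : List String),
    r.take ((pvIdx r ++ [r.length]).headD 0) = (pvG r).2 := by
  intro r
  induction r with
  | nil => simp [pvIdx, pvG]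
  | cons s u ih =>
    simp only [pvIdx, pvG]
    by_cases h : pvHdr s
    · simp [h]
    · simp only [h, Bool.false_eq_true, if_false]
      rcases hd : pvIdx u ++ [u.length] with _ | ⟨d, l'⟩
      · exact absurd hd (by simp)
      · have : (List.map (· + 1) (pvIdx u) ++ [u.length + 1]) = List.map (· + 1) (pvIdx u ++ [u.length]) := by simp
        rw [show (s :: u).length = u.length + 1 by simp, this, hd]
        simp only [List.map_cons, List.headD_cons, List.take_succ_cons]
        have := ih
        rw [hd] at this
        simp only [List.headD_cons] at this
        simp [this]

-- chopping from an initial cut 0 over shifted tail cuts yields head-segment :: header segments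
theorem pvChopHead (x : String) (t : List String)
    (hbody : pvChop t (pvIdx t ++ [t.length]) = (pvG t).1.map (PySem.Str.join " ")) :
    pvChop (x :: t) (0 :: (pvIdx t ++ [t.length]).map (· + 1))
    = PySem.Str.join " " (x :: (pvG t).2) :: (pvG t).1.map (PySem.Str.join " ") := by
  rcases hd : pvIdx t ++ [t.length] with _ | ⟨d, l'⟩
  · exact absurd hd (by simp)
  · have hseg : ((x :: t).drop 0).take (d + 1 - 0) = x :: t.take d := by
      simp [List.take_succ_cons]
    have htake : t.take d = (pvG t).2 := by
      have := pvTakePref t; rw [hd] at this; simpa using this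
    simp only [List.map_cons, pvChop, hseg, htake]
    rw [show ((d + 1) :: l'.map (· + 1)) = (d :: l').map (· + 1) by simp, pvChopShift, ← hd, hbody]
    simp

-- chopping at the header cuts (plus the final length cut) yields the header segments
theorem pvChopBody : ∀ (t : List String),
    pvChop t (pvIdx t ++ [t.length]) = (pvG t).1.map (PySem.Str.join " ") := by
  intro t
  induction t with
  | nil => simp [pvIdx, pvChop, pvG]
  | cons s r ih =>
    simp only [pvIdx, pvG]
    by_cases h : pvHdr s
    · simp only [h, if_true]
      rw [show (0 :: List.map (· + 1) (pvIdx r) ++ [(s :: r).length])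
            = 0 :: (pvIdx r ++ [r.length]).map (· + 1) by simp]
      rw [pvChopHead s r ih]
      simp
    · simp only [h, Bool.false_eq_true, if_false]
      rw [show (List.map (· + 1) (pvIdx r) ++ [(s :: r).length]) = (pvIdx r ++ [r.length]).map (· + 1) by simp, pvChopShift, ih]

-- the filtered enumeration computes the shifted header indices
theorem pvEnumIdx : ∀ (t : List String) (k : Nat),
    ((PySem.List.enumerate t ((k + 1 : Nat) : Int)).filter (fun p => decide (0 < p.1) && pvHdr p.2)).map (·.1)
    = (pvIdx t).map (fun i => ((i + (k + 1) : Nat) : Int)) := by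
  intro t
  induction t with
  | nil => intro k; simp [pvIdx]
  | cons s r ih =>
    intro k
    rw [PySem.List.enumerate_cons]
    have hpos : (decide ((0 : Int) < ((k + 1 : Nat) : Int))) = true := by simp
    have hnext : (((k + 1 : Nat) : Int) + 1) = ((k + 1 + 1 : Nat) : Int) := by push_cast; ring
    have ih' := ih (k + 1)
    simp only [pvIdx, List.filter_cons, hpos, Bool.true_and, hnext]
    by_cases h : pvHdr s
    · simp only [h, if_true, List.map_cons, ih', List.map_map]
      congr 1
      · simp
      apply List.map_congr_left
      intro i _
      simp [Function.comp]
      ring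
    · simp only [h, Bool.false_eq_true, if_false, ih', List.map_map]
      apply List.map_congr_left
      intro i _
      simp [Function.comp]
      ring

-- ===== VERDICT (by name: the statement is the Claim_ definition above) =====
set_option maxHeartbeats 1000000 in
theorem parse_projects_section_spec : Claim_equal_parse_projects_section := by
  intro lines _
  unfold Spec_parse_projects_section parse_projects_section parse_projects_section_alt
  cases lines with
  | nil => rfl
  | cons l ls =>
    simp only [List.map_cons]
    rw [PySem.List.enumerate_cons]
    have hE := pvEnumIdx (ls.map PySem.Str.strip) 0
    simp only [Nat.zero_add, Nat.cast_one] at hE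
    simp only [List.filter_cons, show (decide ((0:Int) < 0)) = false by decide,
      Bool.false_and, Bool.false_eq_true, if_false]
    simp only [zero_add, List.length_cons]
    rw [hE]
    have hcuts : ([(0:Int)] ++ (pvIdx (ls.map PySem.Str.strip)).map (fun i => ((i + 1 : Nat) : Int))
          ++ [(((ls.map PySem.Str.strip).length + 1 : Nat) : Int)])
        = (0 :: (pvIdx (ls.map PySem.Str.strip) ++ [(ls.map PySem.Str.strip).length]).map (· + 1)).map (Nat.cast : Nat → Int) := by
      simp [List.map_map, Function.comp]
    rw [hcuts, pvFoldChop, pvChopHead _ _ (pvChopBody _)]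
    have hA := pvLemA (l :: ls) [] []
    simp only [List.nil_append] at hA
    rw [show (let st := List.foldl pvStepA ([], []) (l :: ls);
          if st.2.isEmpty = true then st.1 else st.1 ++ [PySem.Str.join " " st.2]) = pvFinA (List.foldl pvStepA ([], []) (l :: ls)) from rfl, hA]
    simp only [List.map_cons, pvG]
    by_cases h : pvHdr (PySem.Str.strip l)
    · simp [h]
    · simp [h]
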